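-- pv_equiv track=rewrite | github.com/pypi-data/pypi-mirror-369 | packages/precisiondoc/precisiondoc-0.1.1rc1-py3-none-any.whl/precisiondoc/utils/word/evidence_processing.py | _sort_evidence_dict
-- ===== SOURCE A (Python) =====
-- def _sort_evidence_dict(evidence_dict):
--     """
--     Sort evidence dictionary based on predefined key sequence
--
--     Args:
--         evidence_dict: Dictionary containing evidence data
--
--     Returns:
--         dict: Sorted dictionary
--     """
--     # Define the desired key order
--     key_order = [
--         'symbol',
--         'alteration',
--         'disease_name_cn',
--         'disease_name_en',
--         'drug_name_cn',
--         'drug_name_en',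
--         'drug_combination',
--         'response_type',
--         'resource',
--         'resource_url',
--         'resource_sentence'
--     ]
--
--     # Create a new ordered dictionary
--     sorted_dict = {}
--
--     # First add keys in the specified order
--     for key in key_order:
--         if key in evidence_dict:
--             sorted_dict[key] = evidence_dict[key]
--
--     # Then add any remaining keys that weren't in our predefined order
--     for key, value in evidence_dict.items():
--         if key not in sorted_dict:
--             sorted_dict[key] = value
--
--     return sorted_dict
-- ===== SOURCE B (Python) =====
-- def _sort_evidence_dict(evidence_dict):
--     """Rank-and-sort re-implementation: one stable sort of the items by a
--     precomputed rank (unknown keys share the sentinel rank len(key_order),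
--     so stability keeps their insertion order)."""
--     key_order = [
--         'symbol',
--         'alteration',
--         'disease_name_cn',
--         'disease_name_en',
--         'drug_name_cn',
--         'drug_name_en',
--         'drug_combination',
--         'response_type',
--         'resource',
--         'resource_url',
--         'resource_sentence'
--     ]
--     rank = {k: i for i, k in enumerate(key_order)}
--     sentinel = len(key_order)
--     return dict(sorted(evidence_dict.items(), key=lambda kv: rank.get(kv[0], sentinel)))
-- ===== Notes on version B (the rewrite author's own statement) =====
-- stated objective: idiomatic
-- what changed: A's two selection passes (insert predefined keys in order, then append leftovers) are replaced by a single stable sort of the items under a precomputed rank map, with unknown keys sharing the sentinel rank len(key_order) so stability preserves their insertion order.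
import Mathlib
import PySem

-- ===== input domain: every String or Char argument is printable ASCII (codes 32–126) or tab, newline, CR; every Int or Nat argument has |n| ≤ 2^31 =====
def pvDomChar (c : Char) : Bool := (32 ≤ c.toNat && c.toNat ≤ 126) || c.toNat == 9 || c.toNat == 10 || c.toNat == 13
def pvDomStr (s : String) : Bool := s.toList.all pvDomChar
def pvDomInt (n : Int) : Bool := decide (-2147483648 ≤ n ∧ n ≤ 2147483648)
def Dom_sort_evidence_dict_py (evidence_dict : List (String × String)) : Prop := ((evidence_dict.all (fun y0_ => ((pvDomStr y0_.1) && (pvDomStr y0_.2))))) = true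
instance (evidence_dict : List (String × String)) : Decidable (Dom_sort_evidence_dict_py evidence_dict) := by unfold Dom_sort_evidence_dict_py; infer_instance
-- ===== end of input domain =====

-- B replaces A's two selection passes by one stable sort of the items keyed by a precomputed rank (idiomatic one-pass rewrite; return value only).

-- ===== PORT A =====
-- the literal key_order list of A
def pvKeyOrder : List String :=
  ["symbol", "alteration", "disease_name_cn", "disease_name_en", "drug_name_cn",
   "drug_name_en", "drug_combination", "response_type", "resource", "resource_url",
   "resource_sentence"]

-- 'if key in evidence_dict: sorted_dict[key] = evidence_dict[key]' is the match on get? (some ↔ membership)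
def sort_evidence_dict_py (evidence_dict : List (String × String)) : List (String × String) :=
  let d : PySem.Dict String String := PySem.Dict.mk evidence_dict
  let sd1 : PySem.Dict String String :=
    pvKeyOrder.foldl (fun sd k =>
      match d.get? k with
      | some v => sd.insert k v
      | none => sd) PySem.Dict.empty
  let sd2 : PySem.Dict String String :=
    evidence_dict.foldl (fun sd kv => if sd.contains kv.1 then sd else sd.insert kv.1 kv.2) sd1
  sd2.items

-- ===== PORT B =====
def pvKeyOrderB : List String :=
  ["symbol", "alteration", "disease_name_cn", "disease_name_en", "drug_name_cn",
   "drug_name_en", "drug_combination", "response_type", "resource", "resource_url",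
   "resource_sentence"]

-- rank = {k: i for i, k in enumerate(key_order)}
def pvRank : PySem.Dict String Int :=
  PySem.Dict.ofList ((PySem.List.enumerate pvKeyOrderB 0).map (fun p => (p.2, p.1)))

-- dict(sorted(evidence_dict.items(), key=lambda kv: rank.get(kv[0], sentinel)))
def sort_evidence_dict_py_alt (evidence_dict : List (String × String)) : List (String × String) :=
  let sentinel : Int := (pvKeyOrderB.length : Int)
  (PySem.Dict.ofList (PySem.List.sorted evidence_dict
      (fun kv => pvRank.getD kv.1 sentinel) false)).items

-- ===== PRECONDITION & SPEC =====
-- Pre_ excludes association lists with duplicate keys: they do not represent a Python dict (A's argument type), so neither program's behaviour there is specified.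
def Pre_sort_evidence_dict_py (evidence_dict : List (String × String)) : Prop :=
  (evidence_dict.map Prod.fst).Nodup
instance (evidence_dict : List (String × String)) : Decidable (Pre_sort_evidence_dict_py evidence_dict) := by unfold Pre_sort_evidence_dict_py; infer_instance

def pvWitness_sort_evidence_dict_py : (List (String × String)) :=
  [("resource", "pubmed"), ("zzz", "1"), ("symbol", "EGFR")]

def Spec_sort_evidence_dict_py (evidence_dict : List (String × String)) (out : List (String × String)) : Prop := out = sort_evidence_dict_py_alt evidence_dict
instance (evidence_dict : List (String × String)) (out : List (String × String)) : Decidable (Spec_sort_evidence_dict_py evidence_dict out) := by unfold Spec_sort_evidence_dict_py; infer_instance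

-- ===== CLAIM (what is proved, stated in full; the proofs are below) =====
def Claim_equal_sort_evidence_dict_py : Prop := ∀ (evidence_dict : List (String × String)), Dom_sort_evidence_dict_py evidence_dict → Pre_sort_evidence_dict_py evidence_dict → Spec_sort_evidence_dict_py evidence_dict (sort_evidence_dict_py evidence_dict)

-- ===== LEMMAS AND PROOFS =====

-- a duplicate-free association list is exactly the items of the dict built from it
theorem pv_items_ofList {ν : Type} (l : List (String × ν)) (hnd : (l.map Prod.fst).Nodup) :
    (PySem.Dict.ofList l).items = l := by
  have h := PySem.Dict.items_foldl_insert_fresh l Prod.fst Prod.snd PySem.Dict.empty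
    (fun a _ => PySem.Dict.contains_empty _) hnd
  simpa using h

-- pvRank.get(s, sentinel) is List.idxOf on the key_order list
theorem pvRank_getD (s : String) :
    pvRank.getD s (pvKeyOrderB.length : Int) = ((pvKeyOrderB.idxOf s : Nat) : Int) := by
  have hitems : pvRank.items = (PySem.List.enumerate pvKeyOrderB 0).map (fun p => (p.2, p.1)) := by
    apply pv_items_ofList
    decide
  have hkeys : pvRank.keys = pvKeyOrderB := by
    show pvRank.items.map Prod.fst = pvKeyOrderB
    rw [hitems]
    simp [List.map_map, Function.comp_def]
  by_cases hs : s ∈ pvKeyOrderB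
  · have hlt : pvKeyOrderB.idxOf s < pvKeyOrderB.length := List.idxOf_lt_length_of_mem hs
    have hmem : (s, ((pvKeyOrderB.idxOf s : Nat) : Int)) ∈ pvRank.items := by
      rw [hitems]
      refine List.mem_map.2 ⟨(((pvKeyOrderB.idxOf s : Nat) : Int), s), ?_, rfl⟩
      rw [PySem.List.mem_enumerate_iff]
      exact ⟨pvKeyOrderB.idxOf s, hlt, by rw [List.getElem_idxOf hlt]; simp⟩
    have hnd : pvRank.keys.Nodup := by rw [hkeys]; decide
    exact PySem.Dict.getD_of_mem_items _ hmem hnd _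
  · have hc : pvRank.contains s = false := by
      rw [PySem.Dict.contains_eq_decide_mem_keys, hkeys]
      simp [hs]
    rw [PySem.Dict.getD_of_not_contains (h := hc), List.idxOf_eq_length_iff.2 hs]

-- insertBy passes over a block it is not 'before'
theorem pv_insertBy_append {α : Type} (before : α → α → Bool) (x : α) (l1 l2 : List α)
    (h : ∀ y ∈ l1, before x y = false) :
    PySem.List.insertBy before x (l1 ++ l2) = l1 ++ PySem.List.insertBy before x l2 := by
  induction l1 with
  | nil => simp
  | cons y ys ih =>
    simp only [List.cons_append, PySem.List.insertBy, h y (by simp), Bool.false_eq_true, if_false]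
    rw [ih (fun y hy => h y (by simp [hy]))]

theorem pv_insertBy_front {α : Type} (before : α → α → Bool) (x : α) (l : List α)
    (h : ∀ y ∈ l, before x y = true) :
    PySem.List.insertBy before x l = x :: l := by
  cases l with
  | nil => rfl
  | cons y ys => simp [PySem.List.insertBy, h y (by simp)]

theorem pv_flatMap_congr {α β : Type} (l : List α) (f g : α → List β)
    (h : ∀ a ∈ l, f a = g a) : l.flatMap f = l.flatMap g := by
  induction l with
  | nil => rfl
  | cons a l ih =>
    rw [List.flatMap_cons, List.flatMap_cons, h a (by simp), ih (fun a ha => h a (by simp [ha]))]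

theorem pv_flatMap_insert {α : Type} (key : α → Int) (R : List Int) (hR : R.Pairwise (· < ·))
    (x : α) (hx : key x ∈ R) (xs : List α) :
    PySem.List.insertBy (fun a b => decide (key a < key b)) x
      (R.flatMap (fun r => xs.filter (fun a => key a = r)))
    = R.flatMap (fun r => (xs ++ [x]).filter (fun a => key a = r)) := by
  induction R with
  | nil => simp at hx
  | cons r R' ih =>
    have hfx : (xs ++ [x]).filter (fun a => decide (key a = r))
        = xs.filter (fun a => decide (key a = r)) ++ [x].filter (fun a => decide (key a = r)) :=
      List.filter_append _ _
    rcases List.mem_cons.1 hx with hxr | hxR'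
    · -- key x = r : x goes to the end of the r-fiber
      have hfib : ∀ y ∈ xs.filter (fun a => decide (key a = r)), decide (key x < key y) = false := by
        intro y hy
        have := (List.mem_filter.1 hy).2
        simp at this
        simp [this, hxr]
      rw [List.flatMap_cons, List.flatMap_cons,
        pv_insertBy_append _ _ _ _ hfib]
      have hrest : ∀ y ∈ R'.flatMap (fun r => xs.filter (fun a => decide (key a = r))),
          decide (key x < key y) = true := by
        intro y hy
        rcases List.mem_flatMap.1 hy with ⟨r', hr', hy'⟩
        have hky : key y = r' := by simpa using (List.mem_filter.1 hy').2
        have : r < r' := (List.pairwise_cons.1 hR).1 r' hr'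
        simp [hky, hxr]
        omega
      rw [pv_insertBy_front _ _ _ hrest, hfx]
      have hR'eq : R'.flatMap (fun r => (xs ++ [x]).filter (fun a => decide (key a = r)))
          = R'.flatMap (fun r => xs.filter (fun a => decide (key a = r))) := by
        apply pv_flatMap_congr
        intro r' hr'
        have : r < r' := (List.pairwise_cons.1 hR).1 r' hr'
        rw [List.filter_append]
        have : [x].filter (fun a => decide (key a = r')) = [] := by
          simp [hxr]; omega
        simp [this]
      rw [hR'eq]
      simp [hxr, List.append_assoc]
    · -- key x > r : skip the r-fiber
      have hgt : r < key x := by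
        rcases List.pairwise_cons.1 hR with ⟨h1, _⟩
        exact h1 _ hxR'
      have hfib : ∀ y ∈ xs.filter (fun a => decide (key a = r)), decide (key x < key y) = false := by
        intro y hy
        have hky : key y = r := by simpa using (List.mem_filter.1 hy).2
        simp [hky]; omega
      rw [List.flatMap_cons, List.flatMap_cons, pv_insertBy_append _ _ _ _ hfib,
        ih (List.Pairwise.sublist (List.sublist_cons_self r R') hR) hxR']
      have : [x].filter (fun a => decide (key a = r)) = [] := by
        simp; omega
      rw [hfx, this]
      simp

-- stable sort with finitely many key values is the concatenation of the fibers
theorem pv_stable_sorted {α : Type} (key : α → Int) (R : List Int) (hR : R.Pairwise (· < ·))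
    (xs : List α) (hx : ∀ x ∈ xs, key x ∈ R) :
    PySem.List.sorted xs key false = R.flatMap (fun r => xs.filter (fun a => key a = r)) := by
  induction xs using List.reverseRecOn with
  | nil => simp [PySem.List.sorted]
  | append_singleton xs x ih =>
    rw [PySem.List.sorted_eq_foldl_insertBy, List.foldl_append, List.foldl_cons, List.foldl_nil,
      ← PySem.List.sorted_eq_foldl_insertBy,
      ih (fun y hy => hx y (by simp [hy])),
      pv_flatMap_insert key R hR x (hx x (by simp)) xs]

-- A's first loop appends one item per present key, in key_order order
theorem pv_loop1 (d : PySem.Dict String String) (ks : List String) (sd : PySem.Dict String String)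
    (hnd : ks.Nodup) (h : ∀ k ∈ ks, sd.contains k = false) :
    (ks.foldl (fun sd k => match d.get? k with | some v => sd.insert k v | none => sd) sd).items
    = sd.items ++ ks.filterMap (fun k => (d.get? k).map (fun v => (k, v))) := by
  induction ks generalizing sd with
  | nil => simp
  | cons k ks ih =>
    have hnd' : ks.Nodup := hnd.of_cons
    have hk : k ∉ ks := (List.nodup_cons.1 hnd).1
    cases hd : d.get? k with
    | none =>
      simp only [List.foldl_cons, hd, List.filterMap_cons, Option.map_none]
      exact ih sd hnd' (fun k' hk' => h k' (by simp [hk']))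
    | some v =>
      simp only [List.foldl_cons, hd, List.filterMap_cons, Option.map_some]
      rw [ih (sd.insert k v) hnd' (fun k' hk' => by
        rw [PySem.Dict.contains_insert]
        have hne : k' ≠ k := fun he => hk (he ▸ hk')
        simp [hne, h k' (by simp [hk'])])]
      rw [PySem.Dict.items_insert_of_not_contains sd v (h k (by simp))]
      simp

-- A's second loop appends the items whose key is not yet present
theorem pv_loop2 (l : List (String × String)) (sd : PySem.Dict String String)
    (hnd : (l.map Prod.fst).Nodup) :
    (l.foldl (fun sd kv => if sd.contains kv.1 then sd else sd.insert kv.1 kv.2) sd).items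
    = sd.items ++ l.filter (fun kv => !sd.contains kv.1) := by
  induction l generalizing sd with
  | nil => simp
  | cons kv l ih =>
    have hnd' : (l.map Prod.fst).Nodup := hnd.of_cons
    have hk : kv.1 ∉ l.map Prod.fst := (List.nodup_cons.1 hnd).1
    cases hc : sd.contains kv.1 with
    | true =>
      simp only [List.foldl_cons, hc, if_true, List.filter_cons, Bool.not_true]
      rw [ih sd hnd']
      simp
    | false =>
      simp only [List.foldl_cons, hc, Bool.false_eq_true, if_false, List.filter_cons,
        Bool.not_false, if_true]
      rw [ih (sd.insert kv.1 kv.2) hnd']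
      rw [PySem.Dict.items_insert_of_not_contains sd kv.2 hc]
      have : l.filter (fun kv' => !(sd.insert kv.1 kv.2).contains kv'.1)
          = l.filter (fun kv' => !sd.contains kv'.1) := by
        apply List.filter_congr
        intro kv' hkv'
        rw [PySem.Dict.contains_insert]
        have : kv'.1 ≠ kv.1 := fun he => hk (he ▸ List.mem_map_of_mem hkv')
        simp [this]
      rw [this]
      simp

-- on a duplicate-free association list, the fiber of a key is its (unique) dict entry
theorem pv_filter_eq_get (ed : List (String × String)) (hnd : (ed.map Prod.fst).Nodup) (s : String) :
    ed.filter (fun kv => kv.1 = s)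
    = (((PySem.Dict.mk ed).get? s).map (fun v => (s, v))).toList := by
  induction ed with
  | nil => rfl
  | cons kv t ih =>
    have hnd' : (t.map Prod.fst).Nodup := hnd.of_cons
    have hk : kv.1 ∉ t.map Prod.fst := (List.nodup_cons.1 hnd).1
    obtain ⟨k, v⟩ := kv
    rw [show PySem.Dict.mk ((k, v) :: t) = PySem.Dict.mk ((k, v) :: t) from rfl]
    rw [PySem.Dict.get?_mk_cons]
    by_cases he : k = s
    · subst he
      simp only [beq_self_eq_true, if_true, List.filter_cons]
      have : t.filter (fun kv => kv.1 = k) = [] := by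
        rw [List.filter_eq_nil_iff]
        intro a ha
        have : a.1 ∈ t.map Prod.fst := List.mem_map_of_mem ha
        simp only [decide_eq_true_eq]
        intro hek
        exact hk (by rwa [hek] at this)
      simp [this]
    · have hks : (k == s) = false := by simp [he]
      rw [hks]
      simp only [Bool.false_eq_true, if_false, List.filter_cons]
      have hds : (decide ((k, v).1 = s)) = false := by simp [he]
      rw [hds]
      simp only [Bool.false_eq_true, if_false]
      exact ih hnd'

-- the fiber of rank r < |ks| is the fiber of the key ks[r]
theorem pv_fiber_known (ks : List String) (hnd : ks.Nodup) (ed : List (String × String))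
    (hed : (ed.map Prod.fst).Nodup) (r : Nat) (hr : r < ks.length)
    (ri : Int) (hri : ri = (r : Int)) (k : String) (hk : ks[r] = k) :
    ed.filter (fun kv => ((ks.idxOf kv.1 : Nat) : Int) = ri)
    = (((PySem.Dict.mk ed).get? k).map (fun v => (k, v))).toList := by
  subst hri hk
  rw [← pv_filter_eq_get ed hed ks[r]]
  apply List.filter_congr
  intro kv _
  simp only [decide_eq_decide, Int.natCast_inj]
  constructor
  · intro h
    have hlt : ks.idxOf kv.1 < ks.length := h ▸ hr
    have hg := List.getElem_idxOf hlt
    subst h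
    exact hg.symm
  · intro h
    rw [h]
    exact hnd.idxOf_getElem r hr

-- the sentinel fiber is the keys missing from key_order
theorem pv_fiber_sentinel (ks : List String) (ed : List (String × String)) (p : String → Bool)
    (hp : ∀ kv ∈ ed, (p kv.1 = true ↔ kv.1 ∈ ks))
    (ri : Int) (hri : ri = (ks.length : Int)) :
    ed.filter (fun kv => ((ks.idxOf kv.1 : Nat) : Int) = ri)
    = ed.filter (fun kv => !p kv.1) := by
  subst hri
  apply List.filter_congr
  intro kv hkv
  simp only [Int.natCast_inj]
  by_cases hm : kv.1 ∈ ks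
  · have h1 : ks.idxOf kv.1 ≠ ks.length := by
      have := List.idxOf_lt_length_of_mem hm
      omega
    have h2 : p kv.1 = true := (hp kv hkv).2 hm
    simp [h1, h2]
  · have h1 : ks.idxOf kv.1 = ks.length := List.idxOf_eq_length_iff.2 hm
    have h2 : p kv.1 = false := by
      cases hpb : p kv.1
      · rfl
      · exact absurd ((hp kv hkv).1 hpb) hm
    simp [h1, h2]

-- membership of sd1 after loop 1: exactly the predefined keys that occur in ed
theorem pv_sd1_contains (ed : List (String × String)) (hnd : (ed.map Prod.fst).Nodup)
    (sd1 : PySem.Dict String String)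
    (hI : sd1.items = pvKeyOrder.filterMap
      (fun k => ((PySem.Dict.mk ed).get? k).map (fun v => (k, v)))) :
    ∀ kv ∈ ed, (sd1.contains kv.1 = true ↔ kv.1 ∈ pvKeyOrder) := by
  intro kv hkv
  have hget : (PySem.Dict.mk ed).get? kv.1 = some kv.2 :=
    PySem.Dict.get?_of_mem_items (d := PySem.Dict.mk ed) hkv hnd
  rw [PySem.Dict.contains_eq_decide_mem_keys]
  show decide (kv.1 ∈ sd1.items.map Prod.fst) = true ↔ _
  rw [hI, decide_eq_true_iff]
  constructor
  · rintro hmem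
    rcases List.mem_map.1 hmem with ⟨p, hp, hfst⟩
    rcases List.mem_filterMap.1 hp with ⟨k, hk, hsome⟩
    rcases Option.map_eq_some_iff.1 hsome with ⟨v, _, hv⟩
    rw [← hfst, ← hv]
    exact hk
  · intro hmem
    exact List.mem_map.2 ⟨(kv.1, kv.2), List.mem_filterMap.2 ⟨kv.1, hmem, by rw [hget]; rfl⟩, rfl⟩

-- ===== VERDICT (by name: the statement is the Claim_ definition above) =====
theorem sort_evidence_dict_py_spec : Claim_equal_sort_evidence_dict_py := by
  intro ed _ hnd
  show sort_evidence_dict_py ed = sort_evidence_dict_py_alt ed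
  -- B side
  unfold sort_evidence_dict_py_alt
  simp only [pvRank_getD]
  have hLperm : (PySem.List.sorted ed (fun kv => ((pvKeyOrderB.idxOf kv.1 : Nat) : Int)) false).Perm ed :=
    PySem.List.sorted_perm ed _ false
  have hLnodup : ((PySem.List.sorted ed (fun kv => ((pvKeyOrderB.idxOf kv.1 : Nat) : Int)) false).map Prod.fst).Nodup :=
    ((hLperm.map Prod.fst).symm.nodup_iff).1 hnd
  rw [pv_items_ofList _ hLnodup]
  have hx : ∀ x ∈ ed, ((pvKeyOrderB.idxOf x.1 : Nat) : Int) ∈ ([0,1,2,3,4,5,6,7,8,9,10,11] : List Int) := by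
    intro x _
    have hle : pvKeyOrderB.idxOf x.1 ≤ pvKeyOrderB.length := List.idxOf_le_length
    have h11 : pvKeyOrderB.length = 11 := by decide
    rw [h11] at hle
    simp only [List.mem_cons, List.not_mem_nil, or_false]
    omega
  rw [pv_stable_sorted (fun kv : String × String => ((pvKeyOrderB.idxOf kv.1 : Nat) : Int))
    ([0,1,2,3,4,5,6,7,8,9,10,11] : List Int) (by decide) ed hx]
  simp only [List.flatMap_cons, List.flatMap_nil, List.append_nil]
  -- A side
  simp only [sort_evidence_dict_py]
  rw [pv_loop2 ed _ hnd]
  have hI := pv_loop1 (PySem.Dict.mk ed) pvKeyOrder PySem.Dict.empty (by decide)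
    (fun k _ => PySem.Dict.contains_empty k)
  simp only [show PySem.Dict.empty.items = ([] : List (String × String)) from rfl,
    List.nil_append] at hI
  rw [hI]
  have hp := pv_sd1_contains ed hnd _ hI
  have hKK : pvKeyOrder = pvKeyOrderB := rfl
  rw [hKK] at hp
  -- sentinel fiber
  rw [pv_fiber_sentinel pvKeyOrderB ed _ hp 11 (by decide)]
  -- known fibers
  rw [pv_fiber_known pvKeyOrderB (by decide) ed hnd 0 (by decide) 0 (by decide) "symbol" (by decide),
    pv_fiber_known pvKeyOrderB (by decide) ed hnd 1 (by decide) 1 (by decide) "alteration" (by decide),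
    pv_fiber_known pvKeyOrderB (by decide) ed hnd 2 (by decide) 2 (by decide) "disease_name_cn" (by decide),
    pv_fiber_known pvKeyOrderB (by decide) ed hnd 3 (by decide) 3 (by decide) "disease_name_en" (by decide),
    pv_fiber_known pvKeyOrderB (by decide) ed hnd 4 (by decide) 4 (by decide) "drug_name_cn" (by decide),
    pv_fiber_known pvKeyOrderB (by decide) ed hnd 5 (by decide) 5 (by decide) "drug_name_en" (by decide),
    pv_fiber_known pvKeyOrderB (by decide) ed hnd 6 (by decide) 6 (by decide) "drug_combination" (by decide),
    pv_fiber_known pvKeyOrderB (by decide) ed hnd 7 (by decide) 7 (by decide) "response_type" (by decide),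
    pv_fiber_known pvKeyOrderB (by decide) ed hnd 8 (by decide) 8 (by decide) "resource" (by decide),
    pv_fiber_known pvKeyOrderB (by decide) ed hnd 9 (by decide) 9 (by decide) "resource_url" (by decide),
    pv_fiber_known pvKeyOrderB (by decide) ed hnd 10 (by decide) 10 (by decide) "resource_sentence" (by decide)]
  rw [List.filterMap_eq_flatMap_toList]
  simp only [pvKeyOrder, pvKeyOrderB, List.flatMap_cons,
    List.flatMap_nil, List.append_nil, List.append_assoc]
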